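-- pv_equiv track=rewrite | github.com/arminadm/quera-exercises | summer camp divar/part_two_softwareEngineer/khialam_rahat_bashe.py | set_data_in_order
-- ===== SOURCE A (Python) =====
-- def set_data_in_order(workers_epoches):
--     start = 0
--     end = 32400000
--     time_frame = []
--     time_frame.append([
--         start,
--         workers_epoches[0][1],
--         workers_epoches[0][1] - start,
--     ])
--     for i in range(len(workers_epoches) - 1):
--         time_frame.append([
--             workers_epoches[i][2],
--             workers_epoches[i + 1][1],
--             workers_epoches[i + 1][1] - workers_epoches[i][2],
--         ])
--     time_frame.append([
--         workers_epoches[len(workers_epoches) - 1][1],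
--         end,
--         end - workers_epoches[len(workers_epoches) - 1][1],
--     ])
--     return time_frame
-- ===== SOURCE B (Python) =====
-- def set_data_in_order(workers_epoches):
--     END = 32400000
--
--     def gaps(rows):
--         # rows is a nonempty suffix; emit the gap after rows[0], recursing on the tail
--         if len(rows) == 1:
--             s = rows[0][1]
--             return [[s, END, END - s]]
--         a, b = rows[0], rows[1]
--         return [[a[2], b[1], b[1] - a[2]]] + gaps(rows[1:])
--
--     first = workers_epoches[0][1]
--     return [[0, first, first - 0]] + gaps(workers_epoches)
-- ===== Notes on version B (the rewrite author's own statement) =====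
-- stated objective: alternative
-- what changed: B replaces A's index loop with three special-cased append sites by a recursive pairwise decomposition: a helper recurses on list suffixes, emitting the gap between the first two rows and handling the final interval as its base case.
import Mathlib
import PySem

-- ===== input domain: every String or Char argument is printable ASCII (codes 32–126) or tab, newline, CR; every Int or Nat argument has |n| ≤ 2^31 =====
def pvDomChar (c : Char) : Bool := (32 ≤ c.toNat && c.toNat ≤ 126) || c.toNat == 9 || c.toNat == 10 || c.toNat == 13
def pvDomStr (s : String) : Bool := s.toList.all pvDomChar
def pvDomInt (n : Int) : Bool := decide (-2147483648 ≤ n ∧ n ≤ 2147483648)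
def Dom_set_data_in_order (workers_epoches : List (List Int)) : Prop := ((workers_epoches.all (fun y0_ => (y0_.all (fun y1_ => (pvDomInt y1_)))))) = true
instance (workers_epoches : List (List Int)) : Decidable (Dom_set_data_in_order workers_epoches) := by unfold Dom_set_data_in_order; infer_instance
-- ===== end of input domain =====

-- B replaces A's index loop with three special-cased append sites by a recursive
-- pairwise decomposition (helper recursing on suffixes, final interval as the base case); same O(n) result.


-- ===== PORT A =====
-- workers_epoches[i][j] (i, j nonneg here); pyGetD is exact under Pre_ (all accesses in range)
def wget (w : List (List Int)) (i j : Int) : Int :=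
  PySem.List.pyGetD (PySem.List.pyGetD w i []) j 0

def set_data_in_order (workers_epoches : List (List Int)) : List (List Int) :=
  let start : Int := 0
  let endv : Int := 32400000
  let time_frame : List (List Int) :=
    [[start, wget workers_epoches 0 1, wget workers_epoches 0 1 - start]]
  let time_frame :=
    (PySem.List.pyRange 0 ((workers_epoches.length : Int) - 1) 1).foldl
      (fun acc i =>
        acc ++ [[wget workers_epoches i 2, wget workers_epoches (i + 1) 1,
                 wget workers_epoches (i + 1) 1 - wget workers_epoches i 2]])
      time_frame
  time_frame ++
    [[wget workers_epoches ((workers_epoches.length : Int) - 1) 1, endv,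
      endv - wget workers_epoches ((workers_epoches.length : Int) - 1) 1]]

-- ===== PORT B =====
-- recursive helper 'gaps' from Source B: emits the gap after rows[0], recursing on the tail;
-- the single-row base case emits the final interval (rows[0][1] .. END)
def gapsB : List (List Int) → List (List Int)
  | [] => []   -- unreachable: gaps is only called on nonempty suffixes
  | [a] =>
      let s := PySem.List.pyGetD a 1 0
      [[s, 32400000, 32400000 - s]]
  | a :: b :: rest =>
      [[PySem.List.pyGetD a 2 0, PySem.List.pyGetD b 1 0,
        PySem.List.pyGetD b 1 0 - PySem.List.pyGetD a 2 0]] ++ gapsB (b :: rest)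

def set_data_in_order_alt (workers_epoches : List (List Int)) : List (List Int) :=
  let first := PySem.List.pyGetD (PySem.List.pyGetD workers_epoches 0 []) 1 0
  [[0, first, first - 0]] ++ gapsB workers_epoches

-- ===== PRECONDITION & SPEC =====
-- A raises IndexError on the empty list, on any non-last row shorter than 3 and on any row shorter than 2; Pre_ excludes exactly those.
def Pre_set_data_in_order (workers_epoches : List (List Int)) : Prop :=
  workers_epoches ≠ [] ∧ (∀ r ∈ workers_epoches.dropLast, 3 ≤ r.length) ∧
    (∀ r ∈ workers_epoches, 2 ≤ r.length)
instance (workers_epoches : List (List Int)) : Decidable (Pre_set_data_in_order workers_epoches) := by unfold Pre_set_data_in_order; infer_instance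

def pvWitness_set_data_in_order : List (List Int) := [[0, 5, 7], [1, 9, 12], [2, 20, 25]]

def Spec_set_data_in_order (workers_epoches : List (List Int)) (out : List (List Int)) : Prop := out = set_data_in_order_alt workers_epoches
instance (workers_epoches : List (List Int)) (out : List (List Int)) : Decidable (Spec_set_data_in_order workers_epoches out) := by unfold Spec_set_data_in_order; infer_instance

-- ===== CLAIM (what is proved, stated in full; the proofs are below) =====
def Claim_equal_set_data_in_order : Prop := ∀ (workers_epoches : List (List Int)), Dom_set_data_in_order workers_epoches → Pre_set_data_in_order workers_epoches → Spec_set_data_in_order workers_epoches (set_data_in_order workers_epoches)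

-- ===== LEMMAS AND PROOFS =====

theorem wget_cons_succ (a : List Int) (t : List (List Int)) (k : Nat) (j : Int) :
    wget (a :: t) ((k : Int) + 1) j = wget t (k : Int) j := by
  unfold wget
  rw [show ((k : Int) + 1) = ((k + 1 : Nat) : Int) from by push_cast; ring,
    PySem.List.pyGetD_natCast, PySem.List.pyGetD_natCast, List.getD_cons_succ]

theorem gapsB_eq (w : List (List Int)) (hne : w ≠ []) :
    gapsB w =
      (List.range (w.length - 1)).map (fun (k : Nat) =>
        [wget w (k : Int) 2, wget w ((k : Int) + 1) 1,
         wget w ((k : Int) + 1) 1 - wget w (k : Int) 2]) ++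
      [[wget w ((w.length : Int) - 1) 1, 32400000, 32400000 - wget w ((w.length : Int) - 1) 1]] := by
  induction w with
  | nil => exact absurd rfl hne
  | cons a t ih =>
    cases t with
    | nil =>
      have e1 : (((a :: ([] : List (List Int))).length : Int) - 1) = (0 : Int) := by simp
      show gapsB [a] = _
      rw [e1]
      simp [gapsB, wget, PySem.List.pyGetD_zero_cons]
    | cons b rest =>
      have ht : (b :: rest) ≠ [] := by simp
      have hlen : (a :: b :: rest).length - 1 = ((b :: rest).length - 1) + 1 := by
        simp
      rw [show gapsB (a :: b :: rest) =
            [[PySem.List.pyGetD a 2 0, PySem.List.pyGetD b 1 0,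
              PySem.List.pyGetD b 1 0 - PySem.List.pyGetD a 2 0]] ++ gapsB (b :: rest) from rfl,
          ih ht, hlen, List.range_succ_eq_map]
      have hshift : ∀ (k : Nat) (j : Int), wget (a :: b :: rest) ((k : Int) + 1) j = wget (b :: rest) (k : Int) j :=
        fun k j => wget_cons_succ a (b :: rest) k j
      have hlast : ((a :: b :: rest).length : Int) - 1 = (((b :: rest).length - 1 : Nat) : Int) + 1 := by
        simp only [List.length_cons]; omega
      have hlast2 : (((b :: rest).length : Int)) - 1 = (((b :: rest).length - 1 : Nat) : Int) := by
        simp only [List.length_cons]; omega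
      simp only [List.map_cons, List.map_map, Function.comp_def, List.cons_append, List.nil_append,
        Nat.cast_zero, zero_add, hlast, hlast2]
      congr 1
      · -- head element (k = 0)
        have h01 : wget (a :: b :: rest) ((0 : Nat) : Int) 2 = PySem.List.pyGetD a 2 0 := by
          simp [wget]
        have h02 : wget (a :: b :: rest) (((0 : Nat) : Int) + 1) 1 = PySem.List.pyGetD b 1 0 := by
          rw [hshift 0 1]; simp [wget]
        simp only [Nat.cast_zero, zero_add] at h01 h02
        rw [h01, h02]
      · congr 1
        · refine List.map_congr_left fun k _ => ?_
          have hc : ((Nat.succ k : Nat) : Int) = (k : Int) + 1 := by push_cast; ring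
          rw [hc, hshift k 2, show (k : Int) + 1 + 1 = ((k + 1 : Nat) : Int) + 1 by push_cast; ring,
            hshift (k + 1) 1]
          push_cast
          rfl
        · rw [hshift ((b :: rest).length - 1) 1]

theorem hA_canon (w : List (List Int)) :
    set_data_in_order w =
      [[0, wget w 0 1, wget w 0 1 - 0]] ++
      ((List.range (w.length - 1)).map (fun (k : Nat) =>
        [wget w (k : Int) 2, wget w ((k : Int) + 1) 1,
         wget w ((k : Int) + 1) 1 - wget w (k : Int) 2]) ++
      [[wget w ((w.length : Int) - 1) 1, 32400000, 32400000 - wget w ((w.length : Int) - 1) 1]]) := by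
  have hcast : (((w.length : Int) - 1) - 0).toNat = w.length - 1 := by omega
  simp only [set_data_in_order, PySem.List.foldl_append_singleton_eq_map,
    PySem.List.pyRange_one, hcast, List.map_map]
  simp [Function.comp_def]

theorem ab_agree (w : List (List Int)) (hne : w ≠ []) :
    set_data_in_order w = set_data_in_order_alt w := by
  rw [hA_canon w]
  show _ = [[0, wget w 0 1, wget w 0 1 - 0]] ++ gapsB w
  rw [gapsB_eq w hne]

-- ===== VERDICT (by name: the statement is the Claim_ definition above) =====
theorem set_data_in_order_spec : Claim_equal_set_data_in_order := by
  intro w _ hpre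
  unfold Spec_set_data_in_order
  exact ab_agree w hpre.1
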